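-- pv_equiv track=rewrite | github.com/AndreaVisma/csh_remittances | generalised_pipeline/simulations/effect_individual_components.py | zero_values_before_first_positive_and_after_first_negative
-- ===== SOURCE A (Python) =====
-- def zero_values_before_first_positive_and_after_first_negative(lst):
--     modified = lst.copy()
--     # Find first positive
--     first_positive = next((i for i, x in enumerate(lst) if x > 0), None)
--
--     if first_positive is not None:
--         # Zero before first positive
--         for i in range(first_positive):
--             modified[i] = 0
--
--         # Find first negative AFTER the first positive
--         first_negative_after = next(
--             (i for i, x in enumerate(lst[first_positive:], start=first_positive) if x < 0),
--             None
--         )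
--
--         if first_negative_after is not None:
--             # Zero positives after first negative encountered post-positive
--             for i in range(first_negative_after, len(modified)):
--                 if modified[i] > 0:
--                     modified[i] = 0
--
--     return modified
-- ===== SOURCE B (Python) =====
-- def zero_values_before_first_positive_and_after_first_negative(lst):
--     buf = []            # prefix buffered until a positive is confirmed
--     out = []
--     seen_positive = False
--     seen_negative = False
--     for x in lst:
--         if not seen_positive:
--             if x > 0:
--                 seen_positive = True
--                 out.extend([0] * len(buf))
--                 out.append(x)
--             else:
--                 buf.append(x)
--         elif not seen_negative:
--             out.append(x)
--             if x < 0: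
--                 seen_negative = True
--         else:
--             out.append(0 if x > 0 else x)
--     return out if seen_positive else buf
-- ===== Notes on version B (the rewrite author's own statement) =====
-- stated objective: alternative
-- what changed: Replaced the multi-pass index-search-and-rewrite (find first positive, zero a range, find first negative, rewrite a second range) by a single left-to-right pass carrying seen_positive/seen_negative flags and a buffered prefix.
import Mathlib
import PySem

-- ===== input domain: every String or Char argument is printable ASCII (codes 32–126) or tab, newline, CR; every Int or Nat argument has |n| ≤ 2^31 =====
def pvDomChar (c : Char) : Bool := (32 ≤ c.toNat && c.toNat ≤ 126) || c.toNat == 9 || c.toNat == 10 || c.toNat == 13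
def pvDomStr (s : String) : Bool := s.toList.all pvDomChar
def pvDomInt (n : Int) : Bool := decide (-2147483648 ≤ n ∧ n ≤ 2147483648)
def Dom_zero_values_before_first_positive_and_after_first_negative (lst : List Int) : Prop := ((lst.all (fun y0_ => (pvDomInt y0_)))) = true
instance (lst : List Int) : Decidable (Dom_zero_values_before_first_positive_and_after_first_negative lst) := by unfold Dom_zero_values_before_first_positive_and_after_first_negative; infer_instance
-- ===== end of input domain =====

-- B replaces A's multi-pass index-search-and-rewrite by a single pass with two flags and a buffered prefix (alternative decomposition, same cost).

-- ===== PORT A =====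
def zero_values_before_first_positive_and_after_first_negative (lst : List Int) : List Int :=
  -- first_positive = next((i for i, x in enumerate(lst) if x > 0), None)
  match lst.findIdx? (fun x => decide (0 < x)) with
  | none => lst
  | some i =>
    -- for i in range(first_positive): modified[i] = 0
    let modified := (List.range i).foldl (fun m j => m.set j 0) lst
    -- first_negative_after: first index ≥ i with lst[k] < 0 (offset j of the search in lst[i:], plus i)
    match ((lst.drop i).findIdx? (fun x => decide (x < 0))).map (fun j => j + i) with
    | none => modified
    | some k =>
      -- for i in range(first_negative_after, len(modified)): if modified[i] > 0: modified[i] = 0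
      (List.range' k (modified.length - k)).foldl
        (fun m j => if 0 < m.getD j 0 then m.set j 0 else m) modified

-- ===== PORT B =====
-- one pass; buf buffers the prefix until a positive is confirmed, out is the emitted output
def pvGo : List Int → List Int → List Int → Bool → Bool → List Int
  | [], buf, out, seenP, _seenN => if seenP then out else buf
  | x :: xs, buf, out, seenP, seenN =>
    if !seenP then
      if 0 < x then pvGo xs buf (out ++ List.replicate buf.length 0 ++ [x]) true seenN
      else pvGo xs (buf ++ [x]) out seenP seenN
    else if !seenN then
      pvGo xs buf (out ++ [x]) seenP (decide (x < 0))
    else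
      pvGo xs buf (out ++ [if 0 < x then 0 else x]) seenP seenN

def zero_values_before_first_positive_and_after_first_negative_alt (lst : List Int) : List Int :=
  pvGo lst [] [] false false

-- ===== PRECONDITION & SPEC =====
def Spec_zero_values_before_first_positive_and_after_first_negative (lst : List Int) (out : List Int) : Prop := out = zero_values_before_first_positive_and_after_first_negative_alt lst
instance (lst : List Int) (out : List Int) : Decidable (Spec_zero_values_before_first_positive_and_after_first_negative lst out) := by unfold Spec_zero_values_before_first_positive_and_after_first_negative; infer_instance

-- ===== CLAIM (what is proved, stated in full; the proofs are below) =====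
def Claim_equal_zero_values_before_first_positive_and_after_first_negative : Prop := ∀ (lst : List Int), Dom_zero_values_before_first_positive_and_after_first_negative lst → Spec_zero_values_before_first_positive_and_after_first_negative lst (zero_values_before_first_positive_and_after_first_negative lst)

-- ===== LEMMAS AND PROOFS =====

-- the stage-2 rewrite, pointwise
def pvF (x : Int) : Int := if 0 < x then 0 else x

-- tail after the first negative (post-positive): keep until first negative, then map pvF
def pvS2 : List Int → List Int
  | [] => []
  | x :: xs => if x < 0 then x :: xs.map pvF else x :: pvS2 xs

theorem pvS2_closed (l : List Int) :
    pvS2 l = l.takeWhile (fun x => decide (0 ≤ x)) ++ (l.dropWhile (fun x => decide (0 ≤ x))).map pvF := by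
  induction l with
  | nil => simp [pvS2]
  | cons x xs ih =>
    by_cases h : x < 0
    · simp [pvS2, h, List.takeWhile_cons, List.dropWhile_cons, show ¬ (0 ≤ x) by omega, pvF,
        show ¬ (0 < x) by omega]
    · simp [pvS2, h, List.takeWhile_cons, List.dropWhile_cons, show 0 ≤ x by omega, ih]

-- state 2 of pvGo
theorem pvGo_state2 (xs buf out : List Int) : pvGo xs buf out true true = out ++ xs.map pvF := by
  induction xs generalizing out with
  | nil => simp [pvGo]
  | cons x xs ih => simp [pvGo, ih, pvF]

-- state 1 of pvGo
theorem pvGo_state1 (xs buf out : List Int) : pvGo xs buf out true false = out ++ pvS2 xs := by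
  induction xs generalizing out with
  | nil => simp [pvGo, pvS2]
  | cons x xs ih =>
    by_cases h : x < 0
    · simp [pvGo, h, pvGo_state2, pvS2]
    · simp [pvGo, h, ih, pvS2]

-- state 0 of pvGo
theorem pvGo_state0 (xs buf : List Int) :
    pvGo xs buf [] false false =
      match xs.dropWhile (fun x => decide (x ≤ 0)) with
      | [] => buf ++ xs
      | y :: ys => List.replicate (buf.length + (xs.takeWhile (fun x => decide (x ≤ 0))).length) 0 ++ y :: pvS2 ys := by
  induction xs generalizing buf with
  | nil => simp [pvGo]
  | cons x xs ih =>
    by_cases h : 0 < x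
    · simp [pvGo, h, pvGo_state1, List.dropWhile_cons, show ¬ x ≤ 0 by omega, List.takeWhile_cons]
    · have hx : decide (x ≤ 0) = true := by simp; omega
      have step : pvGo (x :: xs) buf [] false false = pvGo xs (buf ++ [x]) [] false false := by
        simp [pvGo, h]
      rw [step, ih]
      simp only [List.dropWhile_cons, List.takeWhile_cons, hx, if_true, List.length_append,
        List.length_cons, List.length_nil]
      cases hd : xs.dropWhile (fun x => decide (x ≤ 0)) with
      | nil => simp
      | cons y ys =>
        rw [show buf.length + 1 + (xs.takeWhile (fun x => decide (x ≤ 0))).length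
            = buf.length + ((xs.takeWhile (fun x => decide (x ≤ 0))).length + 1) from by omega]

-- the closed form both programs compute
def pvS (lst : List Int) : List Int :=
  match lst.dropWhile (fun x => decide (x ≤ 0)) with
  | [] => lst
  | y :: ys => List.replicate (lst.takeWhile (fun x => decide (x ≤ 0))).length 0 ++ y :: pvS2 ys

theorem alt_eq_pvS (lst : List Int) :
    zero_values_before_first_positive_and_after_first_negative_alt lst = pvS lst := by
  unfold zero_values_before_first_positive_and_after_first_negative_alt pvS
  rw [pvGo_state0]
  cases lst.dropWhile (fun x => decide (x ≤ 0)) <;> simp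

-- findIdx? vs takeWhile/dropWhile
theorem findIdx?_none_iff_dropWhile (l : List Int) (p : Int → Bool) :
    l.findIdx? p = none ↔ l.dropWhile (fun x => !p x) = [] := by
  induction l with
  | nil => simp
  | cons x xs ih =>
    by_cases h : p x <;> simp [List.findIdx?_cons, List.dropWhile_cons, h, ih]

theorem findIdx?_some_eq (l : List Int) (p : Int → Bool) (i : ℕ) (h : l.findIdx? p = some i) :
    i = (l.takeWhile (fun x => !p x)).length ∧ i < l.length := by
  induction l generalizing i with
  | nil => simp at h
  | cons x xs ih =>
    by_cases hp : p x
    · simp [List.findIdx?_cons, hp] at h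
      simp [List.takeWhile_cons, hp, ← h]
    · simp only [List.findIdx?_cons, hp, cond_false] at h
      cases hj : xs.findIdx? p with
      | none => simp [hj] at h
      | some j =>
        simp [hj] at h
        obtain ⟨h1, h2⟩ := ih j hj
        simp [List.takeWhile_cons, hp, ← h, h1]
        omega

-- stage-1 fold: zero the first i positions
theorem foldl_set_zero (lst : List Int) (i : ℕ) (hi : i ≤ lst.length) :
    (List.range i).foldl (fun m j => m.set j 0) lst = List.replicate i 0 ++ lst.drop i := by
  induction i with
  | zero => simp
  | succ n ih =>
    rw [List.range_succ, List.foldl_append, ih (by omega)]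
    simp only [List.foldl_cons, List.foldl_nil]
    rw [List.set_append]
    simp only [List.length_replicate, lt_irrefl, if_neg (lt_irrefl n), Nat.sub_self]
    rw [List.drop_eq_getElem_cons (show n < lst.length by omega), List.set_cons_zero,
      List.replicate_succ']
    simp

-- stage-2 fold: from index k on, map pvF
theorem foldl_range'_map (c k : ℕ) (m : List Int) (hk : k + c = m.length) :
    (List.range' k c).foldl (fun m j => if 0 < m.getD j 0 then m.set j 0 else m) m
      = m.take k ++ (m.drop k).map pvF := by
  induction c generalizing k m with
  | zero =>
    simp only [List.range'_zero, List.foldl_nil]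
    rw [List.take_of_length_le (by omega), List.drop_of_length_le (by omega)]
    simp
  | succ n ih =>
    have hklt : k < m.length := by omega
    rw [List.range'_succ, List.foldl_cons]
    have hget : m.getD k 0 = m[k] := by
      rw [List.getD_eq_getElem?_getD, List.getElem?_eq_getElem hklt]; rfl
    have hdropk : m.drop k = m[k] :: m.drop (k + 1) := List.drop_eq_getElem_cons hklt
    by_cases h : 0 < m[k]
    · rw [if_pos (by rw [hget]; exact h)]
      rw [ih (k+1) (m.set k 0) (by simp; omega)]
      have hset : m.set k 0 = m.take k ++ 0 :: m.drop (k+1) := List.set_eq_take_cons_drop 0 hklt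
      have hlentk : (m.take k).length = k := by simp; omega
      have htake : (m.set k 0).take (k+1) = m.take k ++ [0] := by
        rw [hset, List.take_append, hlentk, List.take_take,
          show min (k+1) k = k from by omega, show k + 1 - k = 1 from by omega]
        simp
      have hdrop : (m.set k 0).drop (k+1) = m.drop (k+1) := by
        rw [hset, List.drop_append, hlentk]
        have hnil : (m.take k).drop (k+1) = [] := List.drop_eq_nil_of_le (by rw [hlentk]; omega)
        rw [hnil]
        simp [show k + 1 - k = 1 by omega]
      rw [htake, hdrop, hdropk]
      simp only [List.map_cons, pvF, if_pos h, List.append_assoc, List.cons_append,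
        List.nil_append]
    · rw [if_neg (by rw [hget]; exact h)]
      rw [ih (k+1) m (by omega), hdropk]
      rw [List.take_succ_eq_append_getElem hklt]
      simp only [List.map_cons, pvF, if_neg h, List.append_assoc, List.cons_append,
        List.nil_append]

theorem head_dropWhile_neg {l : List Int} {y : Int} {ys : List Int} (p : Int → Bool)
    (h : l.dropWhile p = y :: ys) : p y = false := by
  induction l with
  | nil => simp at h
  | cons x xs ih =>
    by_cases hp : p x
    · rw [List.dropWhile_cons, if_pos hp] at h; exact ih h
    · rw [List.dropWhile_cons, if_neg hp] at h
      cases h; simpa using hp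

theorem drop_takeWhile_length (l : List Int) (p : Int → Bool) :
    l.drop (l.takeWhile p).length = l.dropWhile p := by
  have hl : l.takeWhile p ++ l.dropWhile p = l := List.takeWhile_append_dropWhile (p := p) (l := l)
  calc l.drop (l.takeWhile p).length
      = (l.takeWhile p ++ l.dropWhile p).drop (l.takeWhile p).length := by rw [hl]
    _ = l.dropWhile p := by rw [List.drop_append_length]

theorem take_takeWhile_length (l : List Int) (p : Int → Bool) :
    l.take (l.takeWhile p).length = l.takeWhile p := by
  have hl : l.takeWhile p ++ l.dropWhile p = l := List.takeWhile_append_dropWhile (p := p) (l := l)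
  calc l.take (l.takeWhile p).length
      = (l.takeWhile p ++ l.dropWhile p).take (l.takeWhile p).length := by rw [hl]
    _ = l.takeWhile p := by rw [List.take_append_length]

theorem pvNotPos (x : Int) : (!decide (0 < x)) = decide (x ≤ 0) := by
  by_cases h : 0 < x <;> simp [h] <;> omega

theorem pvNotNeg (x : Int) : (!decide (x < 0)) = decide (0 ≤ x) := by
  by_cases h : x < 0 <;> simp [h] <;> omega

theorem a_eq_pvS (lst : List Int) :
    zero_values_before_first_positive_and_after_first_negative lst = pvS lst := by
  unfold zero_values_before_first_positive_and_after_first_negative pvS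
  cases hfi : lst.findIdx? (fun x => decide (0 < x)) with
  | none =>
    rw [findIdx?_none_iff_dropWhile] at hfi
    simp only [funext fun x => pvNotPos x] at hfi
    simp [hfi]
  | some i =>
    obtain ⟨hi, hilt⟩ := findIdx?_some_eq _ _ _ hfi
    simp only [funext fun x => pvNotPos x] at hi
    have hdrop : lst.drop i = lst.dropWhile (fun x => decide (x ≤ 0)) := by
      rw [hi, drop_takeWhile_length]
    cases hdw : lst.dropWhile (fun x => decide (x ≤ 0)) with
    | nil =>
      exfalso
      have := congrArg List.length hdrop
      simp [hdw] at this
      omega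
    | cons y ys =>
      have hy : 0 < y := by
        have := head_dropWhile_neg _ hdw
        simp at this; omega
      have hmod : (List.range i).foldl (fun m j => m.set j 0) lst
          = List.replicate i 0 ++ (y :: ys) := by
        rw [foldl_set_zero lst i (by omega), hdrop, hdw]
      simp only [hmod]
      rw [hdrop, hdw]
      cases hfn : (y :: ys).findIdx? (fun x => decide (x < 0)) with
      | none =>
        -- no negative after: modified is the answer; pvS2 ys = ys
        rw [findIdx?_none_iff_dropWhile] at hfn
        simp only [funext fun x => pvNotNeg x] at hfn
        rw [List.dropWhile_cons, if_pos (by simp; omega)] at hfn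
        have htws : ys.takeWhile (fun x => decide (0 ≤ x)) = ys := by
          have h2 := List.takeWhile_append_dropWhile (p := fun x => decide (0 ≤ x)) (l := ys)
          rwa [hfn, List.append_nil] at h2
        rw [pvS2_closed, hfn, htws, hi]
        simp
      | some j =>
        obtain ⟨hj, hjlt⟩ := findIdx?_some_eq _ _ _ hfn
        simp only [funext fun x => pvNotNeg x] at hj
        simp only [Option.map_some]
        have hmlen : (List.replicate i 0 ++ y :: ys).length = i + (ys.length + 1) := by simp
        have hjy : j < ys.length + 1 := by simpa using hjlt
        rw [hmlen]
        rw [foldl_range'_map ((i + (ys.length + 1)) - (j + i)) (j + i) _ (by simp; omega)]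
        rw [List.take_append, List.drop_append, List.length_replicate,
          List.take_replicate, List.drop_replicate,
          show min (j + i) i = i from by omega, show j + i - i = j from by omega,
          show i - (j + i) = 0 from by omega]
        have htkj : (y :: ys).take j = (y :: ys).takeWhile (fun x => decide (0 ≤ x)) := by
          rw [hj, take_takeWhile_length]
        have hdpj : (y :: ys).drop j = (y :: ys).dropWhile (fun x => decide (0 ≤ x)) := by
          rw [hj, drop_takeWhile_length]
        rw [htkj, hdpj, pvS2_closed, List.takeWhile_cons, List.dropWhile_cons,
          if_pos (show decide (0 ≤ y) = true from by simp; omega),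
          if_pos (show decide (0 ≤ y) = true from by simp; omega), ← hi]
        simp

-- ===== VERDICT (by name: the statement is the Claim_ definition above) =====
theorem zero_values_before_first_positive_and_after_first_negative_spec : Claim_equal_zero_values_before_first_positive_and_after_first_negative := by
  intro lst _
  unfold Spec_zero_values_before_first_positive_and_after_first_negative
  rw [alt_eq_pvS, a_eq_pvS]
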